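-- pv_equiv track=rewrite | github.com/BhawishKumarLohana/cp | reduction.py | can_reduce
-- ===== SOURCE A (Python) =====
-- from collections import Counter
--
-- def can_reduce(arr):
--     if len(arr) == 1:
--         return True
--     # Count occurrences of each value
--     freq = Counter(arr)
--     # Find a value with at least two occurrences
--     for x in freq:
--         if freq[x] >= 2:
--             next_arr = arr[:]
--             count = 0
--             # Remove two x
--             i = 0
--             while count < 2 and i < len(next_arr):
--                 if next_arr[i] == x:
--                     next_arr.pop(i)
--                     count += 1
--                     i -= 1  # because we popped
--                 i += 1
--             # Add x+1
--             next_arr.append(x + 1)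
--             return can_reduce(next_arr)
--     return False
-- ===== SOURCE B (Python) =====
-- from collections import Counter
--
-- def can_reduce(arr):
--     # Sum of 2**a over arr is invariant under merging two equal a's into a+1,
--     # and the array reduces to one element iff that sum is a single power of two.
--     # Count set bits of the sum without building the huge integer: process distinct
--     # exponents in ascending order, propagating a (small) carry across the gaps.
--     cnt = Counter(arr)
--     bits = 0        # finalized set bits of the sum
--     carry = 0       # pending value at exponent `prev` (at most len(arr) + log-size)
--     prev = None
--     for e in sorted(cnt):
--         if prev is not None:
--             gap = e - prev
--             if gap < carry.bit_length():
--                 bits += bin(carry & ((1 << gap) - 1)).count("1")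
--                 carry >>= gap
--             else:
--                 bits += bin(carry).count("1")
--                 carry = 0
--         carry += cnt[e]
--         prev = e
--     bits += bin(carry).count("1")
--     return bits == 1
-- ===== Notes on version B (the rewrite author's own statement) =====
-- stated objective: faster
-- what changed: Replaces A's recursive simulation (rebuild the array and recurse once per merge) with a single pass over the sorted distinct values that counts the set bits of sum(2**a) by carry propagation and returns bits == 1.
import Mathlib
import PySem

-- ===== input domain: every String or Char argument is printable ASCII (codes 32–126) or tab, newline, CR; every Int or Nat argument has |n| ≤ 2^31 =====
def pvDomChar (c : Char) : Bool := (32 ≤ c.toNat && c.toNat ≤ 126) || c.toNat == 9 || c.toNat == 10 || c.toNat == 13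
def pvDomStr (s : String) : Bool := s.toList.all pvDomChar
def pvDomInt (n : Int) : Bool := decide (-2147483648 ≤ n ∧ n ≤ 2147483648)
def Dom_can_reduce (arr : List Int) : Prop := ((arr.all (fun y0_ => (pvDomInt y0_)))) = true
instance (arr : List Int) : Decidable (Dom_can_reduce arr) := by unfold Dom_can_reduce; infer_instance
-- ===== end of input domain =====

-- B replaces A's recursive merge simulation by one pass over the sorted distinct values that
-- counts the set bits of sum(2**a) via carry propagation (asymptotically faster).


-- ===== PORT A =====
-- A's while loop: pop the first two occurrences of x (on a pop, Python's `i -= 1` then `i += 1`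
-- leaves i unchanged, so the port keeps i on that branch). The fuel argument only makes the
-- loop total: next.length - i strictly decreases, so fuel = next.length - i never runs out.
def popTwoGo (x : Int) : Nat → List Int → Nat → Nat → List Int
  | 0, next, _, _ => next
  | fuel + 1, next, count, i =>
    if h : count < 2 ∧ i < next.length then
      if next[i]'h.2 = x then popTwoGo x fuel (next.eraseIdx i) (count + 1) i
      else popTwoGo x fuel next count (i + 1)
    else next

def popTwo (x : Int) (next : List Int) (count : Nat) (i : Nat) : List Int :=
  popTwoGo x (next.length - i) next count i

-- the recursion of A; the fuel argument only makes it total: every recursive call is on a list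
-- one element shorter, so fuel = arr.length + 1 never runs out
def canReduceGo : Nat → List Int → Bool
  | 0, _ => false
  | fuel + 1, arr =>
    if arr.length = 1 then true
    else
      match (PySem.Dict.counter arr).keys.find?
          (fun x => decide (2 ≤ (PySem.Dict.counter arr).getD x 0)) with
      | some x => canReduceGo fuel (popTwo x arr 0 0 ++ [x + 1])
      | none => false

def can_reduce (arr : List Int) : Bool := canReduceGo (arr.length + 1) arr

-- ===== PORT B =====
-- n.bit_length() for n ≥ 0, ported by hand (exact on naturals; fuel = n only makes it total)
def blGo : Nat → Nat → Nat
  | 0, _ => 0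
  | fuel + 1, n => if n = 0 then 0 else blGo fuel (n / 2) + 1

def pyBitLength (n : Nat) : Nat := blGo n n

-- bin(n).count("1") for n ≥ 0, ported by hand (exact on naturals; fuel = n only makes it total)
def pcGo : Nat → Nat → Nat
  | 0, _ => 0
  | fuel + 1, n => if n = 0 then 0 else pcGo fuel (n / 2) + n % 2

def pyPopcount (n : Nat) : Nat := pcGo n n

-- one iteration of B's for-loop; carry & ((1 << gap) - 1) = carry % 2^gap and carry >> gap =
-- carry / 2^gap (exact: carry is a natural and gap > 0 between strictly increasing keys);
-- counts from the Counter are nonnegative, so .toNat is exact.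
def bStep (cnt : PySem.Dict Int Int) (st : Nat × Nat × Option Int) (e : Int) : Nat × Nat × Option Int :=
  match st with
  | (bits, carry, prev) =>
    let (bits, carry) :=
      match prev with
      | none => (bits, carry)
      | some p =>
        let gap := e - p
        if gap < (pyBitLength carry : Int) then
          (bits + pyPopcount (carry % 2 ^ gap.toNat), carry / 2 ^ gap.toNat)
        else
          (bits + pyPopcount carry, 0)
    (bits, carry + ((cnt.getD e 0).toNat), some e)

def can_reduce_alt (arr : List Int) : Bool :=
  let cnt := PySem.Dict.counter arr
  let r := (PySem.List.sorted cnt.keys (fun x => x) false).foldl (bStep cnt) (0, 0, none)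
  decide (r.1 + pyPopcount r.2.1 = 1)

-- ===== PRECONDITION & SPEC =====
def Spec_can_reduce (arr : List Int) (out : Bool) : Prop := out = can_reduce_alt arr
instance (arr : List Int) (out : Bool) : Decidable (Spec_can_reduce arr out) := by unfold Spec_can_reduce; infer_instance

-- ===== CLAIM (what is proved, stated in full; the proofs are below) =====
def Claim_equal_can_reduce : Prop := ∀ (arr : List Int), Dom_can_reduce arr → Spec_can_reduce arr (can_reduce arr)

-- ===== LEMMAS AND PROOFS =====

-- proof-side description of popTwo: remove the first k occurrences of x
def eraseK (x : Int) : Nat → List Int → List Int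
  | 0, l => l
  | _ + 1, [] => []
  | k + 1, a :: l => if a = x then eraseK x k l else a :: eraseK x (k + 1) l

theorem eraseK_nil (x : Int) (k : Nat) : eraseK x k [] = [] := by
  cases k <;> rfl

theorem popTwoGo_eq (x : Int) : ∀ (fuel : Nat) (next : List Int) (count i : Nat),
    next.length - i ≤ fuel →
    popTwoGo x fuel next count i = next.take i ++ eraseK x (2 - count) (next.drop i) := by
  intro fuel
  induction fuel with
  | zero =>
    intro next count i hf
    simp only [popTwoGo]
    rw [List.take_of_length_le (by omega), List.drop_of_length_le (by omega), eraseK_nil]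
    simp
  | succ fuel ih =>
    intro next count i hf
    simp only [popTwoGo]
    by_cases h : count < 2 ∧ i < next.length
    · rw [dif_pos h]
      have hi := h.2
      by_cases heq : next[i]'h.2 = x
      · rw [if_pos heq]
        rw [ih (next.eraseIdx i) (count + 1) i (by rw [List.length_eraseIdx_of_lt hi]; omega)]
        rw [List.eraseIdx_eq_take_drop_succ]
        have htake : (next.take i ++ next.drop (i + 1)).take i = next.take i := by
          rw [List.take_append_of_le_length (by simp; omega)]
          simp
        have hdrop : (next.take i ++ next.drop (i + 1)).drop i = next.drop (i + 1) := by
          rw [List.drop_append_of_le_length (by simp; omega)]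
          simp
        rw [htake, hdrop]
        have hcons : next.drop i = next[i] :: next.drop (i + 1) := by
          rw [List.drop_eq_getElem_cons hi]
        rw [hcons]
        have h2 : 2 - count = (2 - (count + 1)) + 1 := by omega
        rw [h2]
        simp [eraseK, heq]
      · rw [if_neg heq]
        rw [ih next count (i + 1) (by omega)]
        have hcons : next.drop i = next[i] :: next.drop (i + 1) := by
          rw [List.drop_eq_getElem_cons hi]
        have h2 : ∃ k, 2 - count = k + 1 := ⟨1 - count, by omega⟩
        obtain ⟨k, hk⟩ := h2
        have he : eraseK x (k + 1) (next[i] :: next.drop (i + 1)) =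
            next[i] :: eraseK x (k + 1) (next.drop (i + 1)) := by
          simp only [eraseK, if_neg heq]
        have htake : next.take (i + 1) = next.take i ++ [next[i]] := by
          rw [List.take_add_one, List.getElem?_eq_getElem hi]; rfl
        rw [hcons, hk, he, htake]
        simp only [List.append_assoc, List.singleton_append]
    · rw [dif_neg h]
      rcases Nat.lt_or_ge i next.length with hi | hi
      · have hc : count ≥ 2 := by omega
        have : 2 - count = 0 := by omega
        simp [this, eraseK]
      · simp [List.take_of_length_le (by omega), List.drop_of_length_le (by omega), eraseK_nil]

theorem popTwo_eq (x : Int) (next : List Int) (count i : Nat) :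
    popTwo x next count i = next.take i ++ eraseK x (2 - count) (next.drop i) :=
  popTwoGo_eq x (next.length - i) next count i (le_refl _)

theorem length_eraseK (x : Int) : ∀ (k : Nat) (l : List Int), k ≤ l.count x →
    (eraseK x k l).length = l.length - k := by
  intro k l
  induction l generalizing k with
  | nil => intro h; simp at h; simp [h, eraseK]
  | cons a t ih =>
    intro h
    cases k with
    | zero => simp [eraseK]
    | succ k =>
      by_cases hax : a = x
      · simp only [eraseK, if_pos hax]
        have hcount : (a :: t).count x = t.count x + 1 := by
          rw [hax, List.count_cons_self]
        rw [hcount] at h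
        have hk : k ≤ t.count x := by omega
        have hlen : k ≤ t.length := le_trans hk List.count_le_length
        rw [ih k hk]
        simp only [List.length_cons]; omega
      · rw [List.count_cons_of_ne hax] at h
        simp only [eraseK, if_neg hax]
        have hlen : t.length ≥ k + 1 := le_trans h List.count_le_length
        simp only [List.length_cons, ih (k+1) h]; omega

theorem length_popTwo_append {arr : List Int} {x : Int} (hc : 2 ≤ arr.count x) :
    (popTwo x arr 0 0 ++ [x + 1]).length < arr.length := by
  rw [popTwo_eq]
  simp only [List.take_zero, List.drop_zero, List.nil_append]
  have h2 : arr.length ≥ 2 := le_trans hc (List.count_le_length)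
  rw [List.length_append, length_eraseK x 2 arr hc]
  simp; omega

theorem count_of_find?_counter {arr : List Int} {x : Int}
    (h : (PySem.Dict.counter arr).keys.find? (fun x => decide (2 ≤ (PySem.Dict.counter arr).getD x 0)) = some x) :
    2 ≤ arr.count x := by
  have hp := List.find?_some h
  rw [PySem.Dict.getD_counter] at hp
  have : (2 : Int) ≤ (arr.count x : Int) := of_decide_eq_true hp
  exact_mod_cast this

theorem blGo_congr : ∀ (f1 f2 n : Nat), n ≤ f1 → n ≤ f2 → blGo f1 n = blGo f2 n := by
  intro f1
  induction f1 with
  | zero =>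
    intro f2 n h1 _
    have : n = 0 := by omega
    subst this
    cases f2 <;> simp [blGo]
  | succ f1 ih =>
    intro f2 n h1 h2
    cases f2 with
    | zero =>
      have : n = 0 := by omega
      subst this
      simp [blGo]
    | succ f2 =>
      simp only [blGo]
      by_cases h0 : n = 0
      · simp [h0]
      · simp only [if_neg h0]
        rw [ih f2 (n / 2) (by omega) (by omega)]

theorem pyBitLength_eq (n : Nat) : pyBitLength n = if n = 0 then 0 else pyBitLength (n / 2) + 1 := by
  unfold pyBitLength
  cases n with
  | zero => simp [blGo]
  | succ m =>
    rw [if_neg (by omega : ¬ m + 1 = 0)]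
    have hstep : blGo (m + 1) (m + 1) = blGo m ((m + 1) / 2) + 1 := by
      simp [blGo]
    rw [hstep, blGo_congr m ((m + 1) / 2) ((m + 1) / 2) (by omega) (le_refl _)]

theorem pcGo_congr : ∀ (f1 f2 n : Nat), n ≤ f1 → n ≤ f2 → pcGo f1 n = pcGo f2 n := by
  intro f1
  induction f1 with
  | zero =>
    intro f2 n h1 _
    have : n = 0 := by omega
    subst this
    cases f2 <;> simp [pcGo]
  | succ f1 ih =>
    intro f2 n h1 h2
    cases f2 with
    | zero =>
      have : n = 0 := by omega
      subst this
      simp [pcGo]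
    | succ f2 =>
      simp only [pcGo]
      by_cases h0 : n = 0
      · simp [h0]
      · simp only [if_neg h0]
        rw [ih f2 (n / 2) (by omega) (by omega)]

theorem pyPopcount_eq (n : Nat) : pyPopcount n = if n = 0 then 0 else pyPopcount (n / 2) + n % 2 := by
  unfold pyPopcount
  cases n with
  | zero => simp [pcGo]
  | succ m =>
    rw [if_neg (by omega : ¬ m + 1 = 0)]
    have hstep : pcGo (m + 1) (m + 1) = pcGo m ((m + 1) / 2) + (m + 1) % 2 := by
      simp [pcGo]
    rw [hstep, pcGo_congr m ((m + 1) / 2) ((m + 1) / 2) (by omega) (le_refl _)]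

-- the common value: sum of 2^a over the list, in ℚ (exponents may be negative)
def pv (l : List Int) : ℚ := (l.map (fun a => (2:ℚ) ^ a)).sum

def IsPow (q : ℚ) : Prop := ∃ z : Int, q = (2:ℚ) ^ z

-- a finite sum of distinct powers of two is itself a power of two iff it has exactly one term
theorem two_zpow_ne_zero (z : ℤ) : (2:ℚ) ^ z ≠ 0 := zpow_ne_zero z (by norm_num)

theorem isPow_sum_pow (s : Finset ℤ) : IsPow (∑ d ∈ s, (2:ℚ) ^ d) ↔ s.card = 1 := by
  constructor
  · rintro ⟨z, hz⟩
    by_contra hcard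
    rcases Finset.eq_empty_or_nonempty s with rfl | hne
    · simp at hz
      exact two_zpow_ne_zero z hz.symm
    · have hcard2 : 2 ≤ s.card := by
        have := Finset.card_pos.mpr hne
        omega
      set m := s.min' hne with hm
      set N : ℕ := ∑ d ∈ s, 2 ^ (d - m).toNat with hN
      have hterm : ∀ d ∈ s, (2:ℚ) ^ d = (2:ℚ) ^ m * (((2:ℕ) ^ ((d - m).toNat) : ℕ) : ℚ) := by
        intro d hd
        have hmd : m ≤ d := Finset.min'_le s d hd
        have h1 : (((d - m).toNat : ℤ)) = d - m := Int.toNat_of_nonneg (by omega)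
        push_cast
        rw [← zpow_natCast (2:ℚ) (d - m).toNat, h1, ← zpow_add₀ (by norm_num : (2:ℚ) ≠ 0)]
        congr 1
        ring
      have hsum : (∑ d ∈ s, (2:ℚ) ^ d) = (2:ℚ) ^ m * (N : ℚ) := by
        rw [Finset.sum_congr rfl hterm, ← Finset.mul_sum]
        congr 1
        rw [hN]
        push_cast
        rfl
      have hmmem : m ∈ s := Finset.min'_mem s hne
      have hsplit : N = 2 ^ ((m - m).toNat) + ∑ d ∈ s.erase m, 2 ^ (d - m).toNat := by
        rw [hN, ← Finset.add_sum_erase s _ hmmem]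
      have heven : ∀ d ∈ s.erase m, 2 ∣ 2 ^ (d - m).toNat := by
        intro d hd
        have hne' : d ≠ m := (Finset.mem_erase.mp hd).1
        have hdm : m ≤ d := Finset.min'_le s d (Finset.mem_erase.mp hd).2
        have h1 : (d - m).toNat ≠ 0 := by omega
        exact dvd_pow_self 2 h1
      have hEd : 2 ∣ ∑ d ∈ s.erase m, 2 ^ (d - m).toNat := Finset.dvd_sum heven
      have hodd : ¬ 2 ∣ N := by
        obtain ⟨q, hq⟩ := hEd
        rw [hsplit, hq]
        simp only [sub_self, Int.toNat_zero, pow_zero]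
        omega
      have hge3 : 3 ≤ N := by
        have hce : (s.erase m).Nonempty := by
          rw [← Finset.card_pos, Finset.card_erase_of_mem hmmem]
          omega
        have hpos : 0 < ∑ d ∈ s.erase m, 2 ^ (d - m).toNat :=
          Finset.sum_pos (fun d _ => Nat.two_pow_pos _) hce
        obtain ⟨q, hq⟩ := hEd
        rw [hsplit, hq] at hodd ⊢
        simp only [sub_self, Int.toNat_zero, pow_zero] at hodd ⊢
        omega
      have hNq : (N : ℚ) = (2:ℚ) ^ (z - m) := by
        have h2m : (2:ℚ) ^ m ≠ 0 := two_zpow_ne_zero m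
        have h1 : (2:ℚ) ^ m * (N : ℚ) = (2:ℚ) ^ m * (2:ℚ) ^ (z - m) := by
          rw [← zpow_add₀ (by norm_num : (2:ℚ) ≠ 0)]
          have : m + (z - m) = z := by ring
          rw [this, ← hz, hsum]
        exact mul_left_cancel₀ h2m h1
      by_cases hw : (0:ℤ) ≤ z - m
      · have hcast : (N : ℚ) = ((2 ^ ((z - m).toNat) : ℕ) : ℚ) := by
          rw [hNq]
          push_cast
          rw [← zpow_natCast (2:ℚ) (z - m).toNat, Int.toNat_of_nonneg hw]
        have hNN : N = 2 ^ ((z - m).toNat) := by exact_mod_cast hcast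
        rcases Nat.eq_zero_or_pos ((z - m).toNat) with h0 | hpos
        · rw [h0] at hNN
          simp at hNN
          omega
        · apply hodd
          rw [hNN]
          exact dvd_pow_self 2 (by omega)
      · rw [not_le] at hw
        have hk1 : (m - z).toNat ≠ 0 := by omega
        have hmul : (N : ℚ) * ((2 ^ ((m - z).toNat) : ℕ) : ℚ) = 1 := by
          rw [hNq]
          push_cast
          rw [← zpow_natCast (2:ℚ) (m - z).toNat, Int.toNat_of_nonneg (by omega : (0:ℤ) ≤ m - z),
            ← zpow_add₀ (by norm_num : (2:ℚ) ≠ 0)]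
          have : z - m + (m - z) = 0 := by ring
          rw [this, zpow_zero]
        have hmulN : N * 2 ^ ((m - z).toNat) = 1 := by exact_mod_cast hmul
        have h1 := Nat.eq_one_of_mul_eq_one_left hmulN
        have h2 : 2 ^ ((m - z).toNat) = 1 := h1
        have := Nat.pow_eq_one.mp h2
        omega
  · intro h1
    obtain ⟨a, ha⟩ := Finset.card_eq_one.mp h1
    exact ⟨a, by simp [ha]⟩

-- === A-side characterization ===

theorem pv_nil : pv [] = 0 := rfl

theorem pv_cons (a : Int) (l : List Int) : pv (a :: l) = (2:ℚ) ^ a + pv l := by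
  simp [pv]

theorem pv_append (l1 l2 : List Int) : pv (l1 ++ l2) = pv l1 + pv l2 := by
  simp [pv]

theorem pv_eraseK (x : Int) : ∀ (k : Nat) (l : List Int), k ≤ l.count x →
    pv (eraseK x k l) = pv l - (k : ℚ) * (2:ℚ) ^ x := by
  intro k l
  induction l generalizing k with
  | nil =>
    intro h
    simp at h
    simp [h, eraseK]
  | cons a t ih =>
    intro h
    cases k with
    | zero => simp [eraseK]
    | succ k =>
      by_cases hax : a = x
      · simp only [eraseK, if_pos hax]
        have hcount : (a :: t).count x = t.count x + 1 := by
          rw [hax, List.count_cons_self]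
        rw [hcount] at h
        rw [ih k (by omega), pv_cons, hax]
        push_cast
        ring
      · simp only [eraseK, if_neg hax]
        rw [List.count_cons_of_ne hax] at h
        rw [pv_cons, ih (k + 1) h, pv_cons]
        ring

theorem canReduceGo_char : ∀ (fuel : Nat) (l : List Int), l.length < fuel →
    (canReduceGo fuel l = true ↔ (l ≠ [] ∧ IsPow (pv l))) := by
  intro fuel
  induction fuel with
  | zero =>
    intro l hlen
    omega
  | succ fuel ih =>
    intro l hlen
    simp only [canReduceGo]
    by_cases h : l.length = 1
    · rw [if_pos h]
      obtain ⟨a, rfl⟩ := List.length_eq_one_iff.mp h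
      constructor
      · intro _
        exact ⟨by simp, a, by rw [pv_cons, pv_nil]; ring⟩
      · intro _
        rfl
    · rw [if_neg h]
      cases hfind : (PySem.Dict.counter l).keys.find?
          (fun x => decide (2 ≤ (PySem.Dict.counter l).getD x 0)) with
      | some x =>
        show canReduceGo fuel (popTwo x l 0 0 ++ [x + 1]) = true ↔ _
        have hc : 2 ≤ l.count x := count_of_find?_counter hfind
        have hnext : popTwo x l 0 0 ++ [x + 1] = eraseK x 2 l ++ [x + 1] := by
          rw [popTwo_eq]
          simp
        have hpv : pv (popTwo x l 0 0 ++ [x + 1]) = pv l := by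
          rw [hnext, pv_append, pv_eraseK x 2 l hc, pv_cons, pv_nil,
            zpow_add_one₀ (by norm_num : (2:ℚ) ≠ 0)]
          push_cast
          ring
        have hlne : l ≠ [] := by
          rintro rfl
          simp at hc
        have hshort : (popTwo x l 0 0 ++ [x + 1]).length < fuel := by
          have := length_popTwo_append hc
          omega
        rw [ih (popTwo x l 0 0 ++ [x + 1]) hshort, hpv]
        simp [hlne]
      | none =>
        show false = true ↔ _
        simp only [Bool.false_eq_true, false_iff]
        rintro ⟨hlne, hpow⟩
        have hlen2 : 2 ≤ l.length := by
          have h0 : l.length ≠ 0 := by simpa using hlne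
          omega
        have hnodup : l.Nodup := by
          rw [List.nodup_iff_count_le_one]
          intro a
          by_cases ha : a ∈ l
          · have hka : a ∈ (PySem.Dict.counter l).keys := by
              rw [PySem.Dict.keys_counter]
              exact (PySem.Set.mem_ofList l a).mpr ha
            have := List.find?_eq_none.mp hfind a hka
            simp only [decide_eq_true_eq, PySem.Dict.getD_counter] at this
            omega
          · rw [List.count_eq_zero_of_not_mem ha]
            omega
        have hsum : pv l = ∑ d ∈ l.toFinset, (2:ℚ) ^ d := by
          rw [List.sum_toFinset _ hnodup]
          rfl
        have hcard : l.toFinset.card = l.length := List.toFinset_card_of_nodup hnodup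
        rw [hsum] at hpow
        have := (isPow_sum_pow l.toFinset).mp hpow
        omega

theorem A_char : ∀ l : List Int, can_reduce l = true ↔ (l ≠ [] ∧ IsPow (pv l)) := by
  intro l
  exact canReduceGo_char (l.length + 1) l (by omega)

-- === B-side characterization ===

theorem pyBitLength_le_iff (n : Nat) : ∀ k : Nat, pyBitLength n ≤ k ↔ n < 2 ^ k := by
  induction n using Nat.strong_induction_on with
  | _ n ih =>
    intro k
    rw [pyBitLength_eq]
    by_cases h0 : n = 0
    · simp [h0]
    · simp only [if_neg h0]
      cases k with
      | zero =>
        simp only [pow_zero]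
        omega
      | succ k =>
        rw [Nat.add_le_add_iff_right, ih (n / 2) (by omega) k, pow_succ]
        rw [Nat.div_lt_iff_lt_mul (by norm_num)]

-- the set bits of c, placed at exponents starting at p
theorem natRep (c : Nat) : ∀ p : ℤ, ∃ t : Finset ℤ,
    t.card = pyPopcount c ∧ (∀ d ∈ t, p ≤ d ∧ d < p + (pyBitLength c : ℤ)) ∧
    (c : ℚ) * (2:ℚ) ^ p = ∑ d ∈ t, (2:ℚ) ^ d := by
  induction c using Nat.strong_induction_on with
  | _ c ih =>
    intro p
    by_cases h0 : c = 0
    · exact ⟨∅, by rw [pyPopcount_eq]; simp [h0], by simp, by simp [h0]⟩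
    · obtain ⟨t', hcard, hbound, hsum⟩ := ih (c / 2) (by omega) (p + 1)
      have hbl : pyBitLength c = pyBitLength (c / 2) + 1 := by
        rw [pyBitLength_eq]; simp [h0]
      have hpc : pyPopcount c = pyPopcount (c / 2) + c % 2 := by
        rw [pyPopcount_eq]; simp [h0]
      have hcq : (c : ℚ) = 2 * ((c / 2 : ℕ) : ℚ) + ((c % 2 : ℕ) : ℚ) := by
        have : c = 2 * (c / 2) + c % 2 := by omega
        exact_mod_cast this
      have hzp : (2:ℚ) ^ (p + 1) = (2:ℚ) ^ p * 2 := zpow_add_one₀ (by norm_num) p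
      by_cases h2 : c % 2 = 1
      · have hp : p ∉ t' := fun hp => by have := (hbound p hp).1; omega
        refine ⟨insert p t', ?_, ?_, ?_⟩
        · rw [Finset.card_insert_of_notMem hp, hcard, hpc, h2]
        · intro d hd
          rcases Finset.mem_insert.mp hd with rfl | hd'
          · constructor
            · exact le_refl d
            · rw [hbl]; push_cast; omega
          · have := hbound d hd'
            rw [hbl]; push_cast; push_cast at this; omega
        · rw [Finset.sum_insert hp, ← hsum, hcq, h2, hzp]
          push_cast
          ring
      · have h2' : c % 2 = 0 := by omega
        refine ⟨t', ?_, ?_, ?_⟩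
        · rw [hcard, hpc, h2']
          omega
        · intro d hd
          have := hbound d hd
          rw [hbl]; push_cast; push_cast at this; omega
        · rw [← hsum, hcq, h2', hzp]
          push_cast
          ring

def W (cnt : PySem.Dict Int Int) (keys : List Int) : ℚ :=
  (keys.map (fun e => (((cnt.getD e 0).toNat : ℚ)) * (2:ℚ) ^ e)).sum

theorem W_nil (cnt : PySem.Dict Int Int) : W cnt [] = 0 := rfl

theorem W_cons (cnt : PySem.Dict Int Int) (e : Int) (ks : List Int) :
    W cnt (e :: ks) = (((cnt.getD e 0).toNat : ℚ)) * (2:ℚ) ^ e + W cnt ks := by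
  simp [W]

theorem foldB_inv (cnt : PySem.Dict Int Int) : ∀ (keys : List Int), keys.Pairwise (· < ·) →
    ∀ (p : ℤ), (∀ e ∈ keys, p < e) → ∀ (bits carry : Nat) (s : Finset ℤ),
    s.card = bits → (∀ d ∈ s, d < p) →
    ∃ (bits' carry' : Nat) (p' : ℤ) (s' : Finset ℤ),
      keys.foldl (bStep cnt) (bits, carry, some p) = (bits', carry', some p') ∧
      s'.card = bits' ∧ (∀ d ∈ s', d < p') ∧
      (∑ d ∈ s', (2:ℚ) ^ d) + (carry' : ℚ) * 2 ^ p' =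
        (∑ d ∈ s, (2:ℚ) ^ d) + (carry : ℚ) * 2 ^ p + W cnt keys := by
  intro keys
  induction keys with
  | nil =>
    intro _ p _ bits carry s hcard hlt
    exact ⟨bits, carry, p, s, rfl, hcard, hlt, by simp [W_nil]⟩
  | cons e rest ih =>
    intro hpw p hgt bits carry s hcard hlt
    have hpe : p < e := hgt e List.mem_cons_self
    have hpwrest : rest.Pairwise (· < ·) := (List.pairwise_cons.mp hpw).2
    have hgtrest : ∀ e' ∈ rest, e < e' := (List.pairwise_cons.mp hpw).1
    have hge : ((e - p).toNat : ℤ) = e - p := Int.toNat_of_nonneg (by omega)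
    have hce : (2:ℚ) ^ e = (2:ℚ) ^ p * (((2 ^ ((e - p).toNat) : ℕ)) : ℚ) := by
      push_cast
      rw [← zpow_natCast (2:ℚ) ((e - p).toNat), hge,
        ← zpow_add₀ (by norm_num : (2:ℚ) ≠ 0)]
      congr 1
      ring
    simp only [List.foldl_cons]
    by_cases hlt2 : e - p < (pyBitLength carry : ℤ)
    · have hstep : bStep cnt (bits, carry, some p) e =
          (bits + pyPopcount (carry % 2 ^ ((e - p).toNat)),
           carry / 2 ^ ((e - p).toNat) + (cnt.getD e 0).toNat, some e) := by
        simp [bStep, hlt2]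
      rw [hstep]
      obtain ⟨tl, htlc, htlb, htls⟩ := natRep (carry % 2 ^ ((e - p).toNat)) p
      have hmod : carry % 2 ^ ((e - p).toNat) < 2 ^ ((e - p).toNat) :=
        Nat.mod_lt _ (Nat.two_pow_pos _)
      have hblle : pyBitLength (carry % 2 ^ ((e - p).toNat)) ≤ (e - p).toNat :=
        (pyBitLength_le_iff _ _).mpr hmod
      have hdisj : Disjoint s tl := by
        rw [Finset.disjoint_left]
        intro d hds hdt
        have h1 := hlt d hds
        have h2 := (htlb d hdt).1
        omega
      have htlte : ∀ d ∈ tl, d < e := by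
        intro d hd
        have := (htlb d hd).2
        omega
      obtain ⟨bits', carry', p', s', hfold, hcard', hlts', hval⟩ :=
        ih hpwrest e hgtrest (bits + pyPopcount (carry % 2 ^ ((e - p).toNat)))
          (carry / 2 ^ ((e - p).toNat) + (cnt.getD e 0).toNat) (s ∪ tl)
          (by rw [Finset.card_union_of_disjoint hdisj, hcard, htlc])
          (by
            intro d hd
            rcases Finset.mem_union.mp hd with hds | hdt
            · have := hlt d hds; omega
            · exact htlte d hdt)
      refine ⟨bits', carry', p', s', hfold, hcard', hlts', ?_⟩
      rw [hval, Finset.sum_union hdisj, ← htls, W_cons]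
      have hdm : (carry : ℚ) =
          (((2 ^ ((e - p).toNat) : ℕ)) : ℚ) * (((carry / 2 ^ ((e - p).toNat) : ℕ)) : ℚ) +
          (((carry % 2 ^ ((e - p).toNat) : ℕ)) : ℚ) := by
        exact_mod_cast (Nat.div_add_mod carry (2 ^ ((e - p).toNat))).symm
      rw [hce, hdm]
      push_cast
      ring
    · have hstep : bStep cnt (bits, carry, some p) e =
          (bits + pyPopcount carry, 0 + (cnt.getD e 0).toNat, some e) := by
        simp [bStep, hlt2]
      rw [hstep]
      obtain ⟨tl, htlc, htlb, htls⟩ := natRep carry p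
      rw [not_lt] at hlt2
      have hdisj : Disjoint s tl := by
        rw [Finset.disjoint_left]
        intro d hds hdt
        have h1 := hlt d hds
        have h2 := (htlb d hdt).1
        omega
      have htlte : ∀ d ∈ tl, d < e := by
        intro d hd
        have := (htlb d hd).2
        omega
      obtain ⟨bits', carry', p', s', hfold, hcard', hlts', hval⟩ :=
        ih hpwrest e hgtrest (bits + pyPopcount carry) (0 + (cnt.getD e 0).toNat) (s ∪ tl)
          (by rw [Finset.card_union_of_disjoint hdisj, hcard, htlc])
          (by
            intro d hd
            rcases Finset.mem_union.mp hd with hds | hdt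
            · have := hlt d hds; omega
            · exact htlte d hdt)
      refine ⟨bits', carry', p', s', hfold, hcard', hlts', ?_⟩
      rw [hval, Finset.sum_union hdisj, ← htls, W_cons]
      push_cast
      ring

theorem B_char : ∀ l : List Int, can_reduce_alt l = true ↔ (l ≠ [] ∧ IsPow (pv l)) := by
  intro l
  have hkc : (PySem.Dict.counter l).keys = PySem.Set.ofList l := PySem.Dict.keys_counter l
  have hpw : (PySem.List.sorted (PySem.Dict.counter l).keys (fun x => x) false).Pairwise (· < ·) := by
    rw [hkc]
    exact PySem.List.sorted_ofList_pairwise_lt l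
  have hmemk : ∀ e : Int, e ∈ PySem.List.sorted (PySem.Dict.counter l).keys (fun x => x) false ↔ e ∈ l := by
    intro e
    rw [PySem.List.mem_sorted, hkc, PySem.Set.mem_ofList]
  have hWpv : W (PySem.Dict.counter l) (PySem.List.sorted (PySem.Dict.counter l).keys (fun x => x) false) = pv l := by
    have hnodup : (PySem.List.sorted (PySem.Dict.counter l).keys (fun x => x) false).Nodup :=
      hpw.imp ne_of_lt
    have hf : ∀ e : Int, (((PySem.Dict.counter l).getD e 0).toNat : ℚ) * (2:ℚ) ^ e =
        ((l.count e : ℚ)) * (2:ℚ) ^ e := by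
      intro e
      rw [PySem.Dict.getD_counter]
      norm_num
    have h1 : W (PySem.Dict.counter l) (PySem.List.sorted (PySem.Dict.counter l).keys (fun x => x) false) =
        ∑ e ∈ (PySem.List.sorted (PySem.Dict.counter l).keys (fun x => x) false).toFinset,
          ((l.count e : ℚ)) * (2:ℚ) ^ e := by
      rw [W, ← List.sum_toFinset _ hnodup]
      exact Finset.sum_congr rfl (fun e _ => hf e)
    have hfs : (PySem.List.sorted (PySem.Dict.counter l).keys (fun x => x) false).toFinset = l.toFinset := by
      ext a
      simp only [List.mem_toFinset]
      exact hmemk a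
    have h2 : pv l = ∑ e ∈ l.toFinset, ((l.count e : ℚ)) * (2:ℚ) ^ e := by
      have := Finset.sum_multiset_map_count (l : Multiset Int) (fun a => (2:ℚ) ^ a)
      simp only [List.toFinset_coe, Multiset.coe_count] at this
      · rw [pv]
        rw [show ((l.map fun a => (2:ℚ) ^ a).sum) = (Multiset.map (fun a => (2:ℚ) ^ a) (l : Multiset Int)).sum from rfl]
        rw [this]
        exact Finset.sum_congr rfl (fun e _ => by rw [nsmul_eq_mul])
    rw [h1, hfs, h2]
  rcases hk : PySem.List.sorted (PySem.Dict.counter l).keys (fun x => x) false with _ | ⟨e, rest⟩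
  · have hl : l = [] := by
      cases l with
      | nil => rfl
      | cons a t =>
        have : a ∈ PySem.List.sorted (PySem.Dict.counter (a :: t)).keys (fun x => x) false :=
          (hmemk a).mpr List.mem_cons_self
        rw [hk] at this
        simp at this
    subst hl
    simp only [can_reduce_alt]
    rw [hk]
    simp [pyPopcount, pcGo]
  · have hlne : l ≠ [] := by
      rintro rfl
      have : e ∈ ([] : List Int) := (hmemk e).mp (by rw [hk]; exact List.mem_cons_self)
      simp at this
    rw [hk] at hpw
    have hpwrest : rest.Pairwise (· < ·) := (List.pairwise_cons.mp hpw).2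
    have hgtrest : ∀ e' ∈ rest, e < e' := (List.pairwise_cons.mp hpw).1
    have hstep0 : bStep (PySem.Dict.counter l) (0, 0, none) e =
        (0, 0 + ((PySem.Dict.counter l).getD e 0).toNat, some e) := by
      simp [bStep]
    obtain ⟨bits', carry', p', s', hfold, hcard', hlts', hval⟩ :=
      foldB_inv (PySem.Dict.counter l) rest hpwrest e hgtrest 0
        (0 + ((PySem.Dict.counter l).getD e 0).toNat) ∅ (by simp) (by simp)
    have hvtot : (∑ d ∈ s', (2:ℚ) ^ d) + (carry' : ℚ) * 2 ^ p' = pv l := by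
      rw [hval, ← hWpv, hk, W_cons]
      push_cast
      ring
    obtain ⟨t, htc, htb, hts⟩ := natRep carry' p'
    have hdisj : Disjoint s' t := by
      rw [Finset.disjoint_left]
      intro d hds hdt
      have h1 := hlts' d hds
      have h2 := (htb d hdt).1
      omega
    have hScard : (s' ∪ t).card = bits' + pyPopcount carry' := by
      rw [Finset.card_union_of_disjoint hdisj, hcard', htc]
    have hSsum : (∑ d ∈ s' ∪ t, (2:ℚ) ^ d) = pv l := by
      rw [Finset.sum_union hdisj, ← hts]
      exact hvtot
    simp only [can_reduce_alt]
    rw [hk]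
    simp only [List.foldl_cons, hstep0, hfold]
    simp only [decide_eq_true_eq]
    constructor
    · intro h1
      refine ⟨hlne, ?_⟩
      rw [← hSsum]
      exact (isPow_sum_pow (s' ∪ t)).mpr (by omega)
    · rintro ⟨_, hpow⟩
      rw [← hSsum] at hpow
      have := (isPow_sum_pow (s' ∪ t)).mp hpow
      omega

-- ===== VERDICT (by name: the statement is the Claim_ definition above) =====
theorem can_reduce_spec : Claim_equal_can_reduce := by
  intro arr _
  unfold Spec_can_reduce
  rw [Bool.eq_iff_iff, A_char, B_char]
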